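-- pv_equiv track=rewrite | github.com/programophile/CSE220-BRACU | LAB 6 (  Recursion )/Practice Prob/qus-30.py | helper
-- ===== SOURCE A (Python) =====
-- def helper(i,array,target,sum):
--     if i==len(array):
--         return sum==target
--     # if sum==target:
--     #     return True
--     if array[i]%5==0:
--         if array[i+1]==1 and i!=len(array)-2:
--             return helper(i+2,array,target,sum+array[i])
--         return helper(i+1,array,target,sum+array[i])
--     return helper(i+1,array,target,sum) or helper(i+1,array,target,sum+array[i])
-- ===== SOURCE B (Python) =====
-- def helper(i, array, target, sum):
--     # Backward DP: the result depends on target and sum only through target - sum;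
--     # sweep j from the end down to i keeping the set of sums reachable from j (s1)
--     # and from j+1 (s2), instead of A's exponential branching recursion.
--     n = len(array)
--     s1, s2 = {0}, set()
--     for j in reversed(range(i, n)):
--         a = array[j]
--         if a % 5 == 0:
--             if j + 1 < n and array[j + 1] == 1 and j != n - 2:
--                 s1, s2 = {a + s for s in s2}, s1
--             else:
--                 s1, s2 = {a + s for s in s1}, s1
--         else:
--             s1, s2 = s1 | {a + s for s in s1}, s1
--     return target - sum in s1
-- ===== Notes on version B (the rewrite author's own statement) =====
-- stated objective: alternative
-- what changed: A explores every subset by top-down branching recursion; B does one backward sweep over the array maintaining the set of reachable sum-offsets, using that the answer depends only on target - sum (a set-based DP; it collapses duplicate sums but in the worst case the set of distinct sums still grows like A's recursion tree).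
-- crash fix: On i > len(array), and on -len(array) <= i < len(array) with the last element divisible by 5 (the recursion always reaches the last index and then reads array[len]), A raises IndexError while B returns the subset-sum answer. — e.g. on helper(0, [5], 5, 0): A raises IndexError, B returns true
import Mathlib
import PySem

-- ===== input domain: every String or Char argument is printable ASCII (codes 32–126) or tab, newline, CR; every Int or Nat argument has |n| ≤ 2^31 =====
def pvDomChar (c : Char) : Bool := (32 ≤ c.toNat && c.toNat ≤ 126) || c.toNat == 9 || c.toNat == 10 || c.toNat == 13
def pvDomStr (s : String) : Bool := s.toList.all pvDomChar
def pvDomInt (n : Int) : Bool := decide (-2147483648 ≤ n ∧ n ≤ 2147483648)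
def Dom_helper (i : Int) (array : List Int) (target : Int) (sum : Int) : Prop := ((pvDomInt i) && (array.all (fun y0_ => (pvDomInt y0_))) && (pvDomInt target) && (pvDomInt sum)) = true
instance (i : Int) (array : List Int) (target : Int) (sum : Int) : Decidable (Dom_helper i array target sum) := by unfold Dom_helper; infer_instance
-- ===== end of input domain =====

-- B replaces A's exponential branching recursion by a backward sweep over reachable
-- sum-offsets (sets), using that the result depends on target and sum only via target - sum.


-- ===== PORT A =====
-- used by the port's termination proof
theorem pvGet_some_lt {α : Type} (xs : List α) (i : Int) (a : α)
    (h : PySem.List.pyGet? xs i = some a) : i < (xs.length : Int) := by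
  simp only [PySem.List.pyGet?, PySem.List.pyIdx?] at h
  split_ifs at h <;> first | omega | simp at h

def helper (i : Int) (array : List Int) (target : Int) (sum : Int) : Bool :=
  if i = (array.length : Int) then sum == target
  else
    match h : PySem.List.pyGet? array i with
    | none => false          -- Python raises IndexError here; outside Pre_helper
    | some a =>
      if PySem.Int.mod a 5 == 0 then
        match PySem.List.pyGet? array (i + 1) with
        | none => false      -- Python raises IndexError here; outside Pre_helper
        | some b =>
          if b == 1 && i != (array.length : Int) - 2 then
            helper (i + 2) array target (sum + a)
          else
            helper (i + 1) array target (sum + a)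
      else
        helper (i + 1) array target sum || helper (i + 1) array target (sum + a)
termination_by ((array.length : Int) - i).toNat
decreasing_by
  all_goals (have := pvGet_some_lt array i _ h; omega)

-- ===== PORT B =====
-- one iteration of Source B's loop body: state (s1, s2) = (sums reachable from j+1, from j+2)
def helperAltStep (array : List Int) (p : PySem.Set Int × PySem.Set Int) (j : Int) :
    PySem.Set Int × PySem.Set Int :=
  match PySem.List.pyGet? array j with
  | none => p                -- Source B's array[j] raises here; outside Pre_helper
  | some a =>
    if PySem.Int.mod a 5 == 0 then
      if decide (j + 1 < (array.length : Int)) && (PySem.List.pyGetD array (j + 1) 0 == 1)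
          && !decide (j = (array.length : Int) - 2) then
        (PySem.Set.ofList (p.2.map (fun s => a + s)), p.1)
      else
        (PySem.Set.ofList (p.1.map (fun s => a + s)), p.1)
    else
      (PySem.Set.union p.1 (PySem.Set.ofList (p.1.map (fun s => a + s))), p.1)

def helper_alt (i : Int) (array : List Int) (target : Int) (sum : Int) : Bool :=
  let r := ((PySem.List.pyRange i (array.length : Int) 1).reverse).foldl
    (helperAltStep array) (PySem.Set.ofList [0], PySem.Set.empty)
  PySem.Set.contains r.1 (target - sum)

-- ===== PRECONDITION & SPEC =====
-- Pre_ is exactly the set of inputs on which A returns: -len ≤ i ≤ len (outside, array[i]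
-- raises IndexError) and, for i < len, a last element not divisible by 5 — otherwise the
-- recursion always reaches the last index and A's read of array[i+1] there raises IndexError.
def Pre_helper (i : Int) (array : List Int) (target : Int) (sum : Int) : Prop :=
  -(array.length : Int) ≤ i ∧ i ≤ (array.length : Int) ∧
    (i < (array.length : Int) → PySem.Int.mod (array.getLastD 0) 5 ≠ 0)
instance (i : Int) (array : List Int) (target : Int) (sum : Int) : Decidable (Pre_helper i array target sum) := by unfold Pre_helper; infer_instance
def pvWitness_helper : Int × List Int × Int × Int := (0, [1, 2, 3], 3, 0)

-- On i > len(array), and on -len ≤ i < len with the last element divisible by 5, A raises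
-- IndexError while B returns the subset-sum answer for the suffix it was asked about.
def Raises_helper (i : Int) (array : List Int) (target : Int) (sum : Int) : Prop :=
  (array.length : Int) < i ∨
    (-(array.length : Int) ≤ i ∧ i < (array.length : Int) ∧
      PySem.Int.mod (array.getLastD 0) 5 = 0)
instance (i : Int) (array : List Int) (target : Int) (sum : Int) : Decidable (Raises_helper i array target sum) := by unfold Raises_helper; infer_instance
def pvRaiseWitness_helper : Int × List Int × Int × Int := (0, [5], 5, 0)
def pvRaiseWitnessOut_helper : Bool := true

def Spec_helper (i : Int) (array : List Int) (target : Int) (sum : Int) (out : Bool) : Prop := out = helper_alt i array target sum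
instance (i : Int) (array : List Int) (target : Int) (sum : Int) (out : Bool) : Decidable (Spec_helper i array target sum out) := by unfold Spec_helper; infer_instance

-- ===== CLAIM (what is proved, stated in full; the proofs are below) =====
def Claim_equal_helper : Prop := ∀ (i : Int) (array : List Int) (target : Int) (sum : Int), Dom_helper i array target sum → Pre_helper i array target sum → Spec_helper i array target sum (helper i array target sum)
def Claim_raises_helper : Prop := (∀ (i : Int) (array : List Int) (target : Int) (sum : Int), Dom_helper i array target sum → Raises_helper i array target sum → ¬ Pre_helper i array target sum) ∧ (Dom_helper (pvRaiseWitness_helper.1) (pvRaiseWitness_helper.2.1) (pvRaiseWitness_helper.2.2.1) (pvRaiseWitness_helper.2.2.2) ∧ Raises_helper (pvRaiseWitness_helper.1) (pvRaiseWitness_helper.2.1) (pvRaiseWitness_helper.2.2.1) (pvRaiseWitness_helper.2.2.2) ∧ helper_alt (pvRaiseWitness_helper.1) (pvRaiseWitness_helper.2.1) (pvRaiseWitness_helper.2.2.1) (pvRaiseWitness_helper.2.2.2) = pvRaiseWitnessOut_helper)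

-- ===== LEMMAS AND PROOFS =====

-- B's fold started at position j (the state after the loop has processed indices n-1 … j)
def Ffold (array : List Int) (j : Int) : PySem.Set Int × PySem.Set Int :=
  ((PySem.List.pyRange j (array.length : Int) 1).reverse).foldl
    (helperAltStep array) (PySem.Set.ofList [0], PySem.Set.empty)

theorem Ffold_top (array : List Int) (j : Int) (h : (array.length : Int) ≤ j) :
    Ffold array j = (PySem.Set.ofList [0], PySem.Set.empty) := by
  unfold Ffold
  rw [PySem.List.pyRange_one_eq_nil h]
  rfl

theorem Ffold_step (array : List Int) (j : Int) (h : j < (array.length : Int)) :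
    Ffold array j = helperAltStep array (Ffold array (j + 1)) j := by
  unfold Ffold
  rw [PySem.List.pyRange_one_cons h]
  simp [List.foldl_append]

theorem helperAltStep_snd (array : List Int) (p : PySem.Set Int × PySem.Set Int) (j : Int)
    (a : Int) (h : PySem.List.pyGet? array j = some a) :
    (helperAltStep array p j).2 = p.1 := by
  unfold helperAltStep
  simp only [h]
  split_ifs <;> rfl

theorem contains_ofList_map_add (S : List Int) (a x : Int) :
    PySem.Set.contains (PySem.Set.ofList (S.map (fun s => a + s))) x
      = PySem.Set.contains S (x - a) := by
  simp only [PySem.Set.contains, List.contains_eq_mem, PySem.Set.mem_ofList, List.mem_map,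
    decide_eq_decide]
  constructor
  · rintro ⟨s, hs, rfl⟩; simpa using hs
  · intro hs; exact ⟨x - a, hs, by ring⟩

theorem contains_union_map_add (S : PySem.Set Int) (a x : Int) :
    PySem.Set.contains (PySem.Set.union S (PySem.Set.ofList (S.map (fun s => a + s)))) x
      = (PySem.Set.contains S x || PySem.Set.contains S (x - a)) := by
  have h := contains_ofList_map_add S a x
  simp only [PySem.Set.contains, List.contains_eq_mem] at h ⊢
  by_cases hx : x ∈ S
  · simp [hx, PySem.Set.mem_union]
  · simp [hx, PySem.Set.mem_union, ← h]

theorem getLastD_eq_getElem (array : List Int) (h : array ≠ []) :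
    array.getLastD 0 = array[array.length - 1]'(by
      have := List.length_pos_iff.mpr h; omega) := by
  rw [List.getLastD_eq_getLast?, List.getLast?_eq_getElem?]
  rw [List.getElem?_eq_getElem (by have := List.length_pos_iff.mpr h; omega)]
  rfl

theorem pvGet_some_of_inRange (xs : List Int) (i : Int) (h1 : -(xs.length : Int) ≤ i)
    (h2 : i < (xs.length : Int)) : ∃ a, PySem.List.pyGet? xs i = some a := by
  simp only [PySem.List.pyGet?, PySem.List.pyIdx?]
  by_cases ha : 0 ≤ i
  · rw [if_pos ha, if_pos h2]
    exact ⟨xs[i.toNat]'(by omega),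
      by simp [List.getElem?_eq_getElem (show i.toNat < xs.length by omega)]⟩
  · rw [if_neg ha, if_pos h1]
    exact ⟨xs[xs.length - (-i).toNat]'(by omega),
      by simp [List.getElem?_eq_getElem (show xs.length - (-i).toNat < xs.length by omega)]⟩

theorem helper_eq_Ffold (array : List Int) :
    ∀ (k : Nat) (j : Int), ((array.length : Int) - j).toNat = k → -(array.length : Int) ≤ j →
    j ≤ (array.length : Int) →
    (j < (array.length : Int) → PySem.Int.mod (array.getLastD 0) 5 ≠ 0) →
    ∀ (target sum : Int),
      helper j array target sum = PySem.Set.contains (Ffold array j).1 (target - sum) := by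
  intro k
  induction k using Nat.strong_induction_on with
  | _ k IH =>
    intro j hk h0 hle hlast target sum
    by_cases hj : j = (array.length : Int)
    · rw [helper]
      rw [if_pos hj, Ffold_top array j (le_of_eq hj.symm)]
      by_cases h : sum = target
      · simp [h, PySem.Set.contains, PySem.Set.ofList, PySem.Set.add, List.contains_eq_mem]
      · have hne : ¬ (target - sum = 0) := fun hc => h (by omega)
        simp [PySem.Set.contains, PySem.Set.ofList, PySem.Set.add, List.contains_eq_mem, h, hne]
    · have hjlt : j < (array.length : Int) := lt_of_le_of_ne hle hj
      rw [helper, Ffold_step array j hjlt]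
      rw [if_neg hj]
      split
      next heq =>
        obtain ⟨a, hget⟩ := pvGet_some_of_inRange array j h0 hjlt
        rw [hget] at heq; exact absurd heq (by simp)
      next a hget =>
      unfold helperAltStep
      simp only [hget]
      by_cases h5 : PySem.Int.mod a 5 == 0
      · -- array[j] divisible by 5: A reads array[j+1]; under Pre_ j is not the last index
        have hjlast : j < (array.length : Int) - 1 := by
          rcases lt_or_eq_of_le (by omega : j ≤ (array.length : Int) - 1) with h | h
          · exact h
          · exfalso
            apply hlast hjlt
            have hlen : 0 < array.length := by omega
            have hj0 : 0 ≤ j := by omega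
            have hjn : j.toNat < array.length := by omega
            rw [PySem.List.pyGet?_of_nonneg array hj0, List.getElem?_eq_getElem hjn] at hget
            have haa : a = array[j.toNat] := by injection hget with hh; exact hh.symm
            have hne : array ≠ [] := by
              intro hnil; rw [hnil] at hlen; simp at hlen
            rw [getLastD_eq_getElem array hne]
            have hidx : array.length - 1 = j.toNat := by omega
            simp only [hidx]
            rw [← haa]
            simpa using h5
        obtain ⟨b, hget1⟩ := pvGet_some_of_inRange array (j + 1) (by omega) (by omega)
        simp only [hget1]
        rw [if_pos h5, if_pos h5]
        have hcondeq :
            (decide (j + 1 < (array.length : Int)) && (PySem.List.pyGetD array (j + 1) 0 == 1)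
              && !decide (j = (array.length : Int) - 2))
            = (b == 1 && j != (array.length : Int) - 2) := by
          have hgd : PySem.List.pyGetD array (j + 1) 0 = b := by
            simp [PySem.List.pyGetD, hget1]
          have ht : (decide (j + 1 < (array.length : Int))) = true := decide_eq_true (by omega)
          rw [hgd, ht]
          by_cases hb1 : b = 1 <;> by_cases hd : j = (array.length : Int) - 2 <;>
            simp [hb1, hd, bne]
        rw [hcondeq]
        by_cases hc : (b == 1 && j != (array.length : Int) - 2) = true
        · rw [if_pos hc, if_pos hc]
          -- jump: j ≠ len-2, so j + 2 ≤ len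
          have hjne2 : j ≠ (array.length : Int) - 2 := by
            intro h; rw [h] at hc; simp at hc
          have hj2 : j + 2 ≤ (array.length : Int) := by omega
          have hIH := IH (((array.length : Int) - (j + 2)).toNat) (by omega)
            (j + 2) rfl (by omega) hj2 (fun h => hlast hjlt) target (sum + a)
          rw [hIH]
          have hsnd : (Ffold array (j + 1)).2 = (Ffold array (j + 2)).1 := by
            have h12 : j + 1 + 1 = j + 2 := by omega
            rw [Ffold_step array (j + 1) (by omega), h12,
              helperAltStep_snd array (Ffold array (j + 2)) (j + 1) b hget1]
          rw [hsnd, contains_ofList_map_add]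
          congr 1
          omega
        · rw [if_neg hc, if_neg hc]
          have hIH := IH (((array.length : Int) - (j + 1)).toNat) (by omega)
            (j + 1) rfl (by omega) (by omega) (fun h => hlast hjlt) target (sum + a)
          rw [hIH, contains_ofList_map_add]
          congr 1
          omega
      · rw [if_neg (by simpa using h5), if_neg (by simpa using h5)]
        have hIH1 := IH (((array.length : Int) - (j + 1)).toNat) (by omega)
          (j + 1) rfl (by omega) (by omega) (fun h => hlast hjlt) target sum
        have hIH2 := IH (((array.length : Int) - (j + 1)).toNat) (by omega)
          (j + 1) rfl (by omega) (by omega) (fun h => hlast hjlt) target (sum + a)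
        rw [hIH1, hIH2, show target - (sum + a) = target - sum - a from by omega,
          contains_union_map_add]

-- ===== VERDICT (by name: the statement is the Claim_ definition above) =====
theorem helper_spec : Claim_equal_helper := by
  intro i array target sum _hdom hpre
  obtain ⟨h0, hle, hlast⟩ := hpre
  unfold Spec_helper helper_alt
  have := helper_eq_Ffold array (((array.length : Int) - i).toNat) i rfl h0 hle hlast target sum
  rw [this]
  rfl

theorem helper_raises : Claim_raises_helper := by
  unfold Claim_raises_helper
  constructor
  · intro i array target sum _hdom hr hpre
    obtain ⟨h0, hle, hlast⟩ := hpre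
    rcases hr with h | ⟨h1, h2, h3⟩
    · omega
    · exact hlast h2 h3
  · exact ⟨by decide, by decide, by decide⟩

-- self-check: B's port really returns the pinned value at the raise witness (reads it off helper_raises)
theorem pvRaiseWitnessOut_ok :
    helper_alt pvRaiseWitness_helper.1 pvRaiseWitness_helper.2.1 pvRaiseWitness_helper.2.2.1
      pvRaiseWitness_helper.2.2.2 = pvRaiseWitnessOut_helper :=
  helper_raises.2.2.2
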